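-- pv_equiv track=rewrite | github.com/matuspintek-boop/ib111 | 10/p6_circle.py | dfs_indexator
-- ===== SOURCE A (Python) =====
-- num = int
--
-- def dfs_indexator(number: num, length: int,
--                   data_set: set[tuple[num, int]]) -> tuple[bool, int]:
--     output = False
--     index = 0
--     for i in range(length+1):
--         if (number, i) in data_set:
--             output = True
--             index = i
--     return (output, index)
-- ===== SOURCE B (Python) =====
-- num = int
--
-- def dfs_indexator(number: num, length: int,
--                   data_set: set[tuple[num, int]]) -> tuple[bool, int]:
--     hits = [i for (n, i) in data_set if n == number and 0 <= i <= length]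
--     if hits:
--         return (True, max(hits))
--     return (False, 0)
-- ===== Notes on version B (the rewrite author's own statement) =====
-- stated objective: faster
-- what changed: B iterates over the data set itself, collecting the indices paired with the number that lie in [0, length], and returns their maximum, instead of A's scan over every index in range(length+1) with a membership test per index.
import Mathlib
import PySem

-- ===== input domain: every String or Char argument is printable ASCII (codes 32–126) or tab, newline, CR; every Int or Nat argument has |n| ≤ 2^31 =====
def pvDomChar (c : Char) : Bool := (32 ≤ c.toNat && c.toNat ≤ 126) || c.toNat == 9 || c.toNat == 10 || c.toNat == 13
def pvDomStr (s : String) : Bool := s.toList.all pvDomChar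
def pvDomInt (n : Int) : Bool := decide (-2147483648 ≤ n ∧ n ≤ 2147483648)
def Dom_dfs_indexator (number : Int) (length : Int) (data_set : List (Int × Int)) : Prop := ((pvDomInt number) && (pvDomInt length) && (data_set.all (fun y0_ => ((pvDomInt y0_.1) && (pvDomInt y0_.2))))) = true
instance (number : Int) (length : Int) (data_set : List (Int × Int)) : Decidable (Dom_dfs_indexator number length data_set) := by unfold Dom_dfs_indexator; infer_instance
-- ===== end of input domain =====

-- B collects the matching indices by a single pass over the data set itself and returns their maximum, instead of A's scan over the whole index range 0..length; alternative decomposition (data-driven instead of index-driven).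


-- ===== PORT A =====
-- A: upward scan over range(length+1), overwriting (output, index) at every membership hit.
def dfs_indexator (number : Int) (length : Int) (data_set : List (Int × Int)) : Bool × Int :=
  (PySem.List.pyRange 0 (length + 1) 1).foldl
    (fun st i => if data_set.contains (number, i) then (true, i) else st)
    (false, 0)

-- ===== PORT B =====
-- B: one pass over data_set collecting the indices paired with `number` that lie in [0, length]; the answer is their maximum (max(hits)), or (false, 0) when there is none.
def dfs_indexator_alt (number : Int) (length : Int) (data_set : List (Int × Int)) : Bool × Int :=
  let hits := data_set.filterMap
    (fun q => if q.1 = number ∧ 0 ≤ q.2 ∧ q.2 ≤ length then some q.2 else none)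
  match PySem.List.max? hits (fun y => y) with
  | some m => (true, m)
  | none => (false, 0)

-- ===== PRECONDITION & SPEC =====
def Spec_dfs_indexator (number : Int) (length : Int) (data_set : List (Int × Int)) (out : Bool × Int) : Prop := out = dfs_indexator_alt number length data_set
instance (number : Int) (length : Int) (data_set : List (Int × Int)) (out : Bool × Int) : Decidable (Spec_dfs_indexator number length data_set out) := by unfold Spec_dfs_indexator; infer_instance

-- ===== CLAIM (what is proved, stated in full; the proofs are below) =====
def Claim_equal_dfs_indexator : Prop := ∀ (number : Int) (length : Int) (data_set : List (Int × Int)), Dom_dfs_indexator number length data_set → Spec_dfs_indexator number length data_set (dfs_indexator number length data_set)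

-- ===== LEMMAS AND PROOFS =====

-- A last-match overwriting fold equals the first match of the reversed list.
theorem foldl_lastMatch_eq_find?_reverse (p : Int → Bool) (l : List Int) (init : Bool × Int) :
    l.foldl (fun st i => if p i then (true, i) else st) init
      = (match l.reverse.find? p with
         | some i => (true, i)
         | none => init) := by
  induction l using List.reverseRecOn with
  | nil => simp
  | append_singleton xs x ih =>
      simp only [List.foldl_append, List.foldl_cons, List.foldl_nil, List.reverse_append,
        List.reverse_cons, List.reverse_nil, List.nil_append, List.cons_append, List.find?]
      by_cases h : p x
      · simp [h]
      · simp [h, ih]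

-- On a strictly descending list, the first match is the greatest match.
theorem find?_desc_isMax (p : Int → Bool) (l : List Int) (hl : l.Pairwise (fun a b => b < a))
    (x : Int) (hx : l.find? p = some x) : ∀ y ∈ l, p y = true → y ≤ x := by
  induction l with
  | nil => simp at hx
  | cons a t ih =>
      intro y hy hpy
      by_cases ha : p a
      · simp only [List.find?, ha] at hx
        cases hx
        rcases List.mem_cons.mp hy with hy | hy
        · exact le_of_eq hy
        · exact le_of_lt ((List.pairwise_cons.mp hl).1 y hy)
      · simp only [List.find?, ha] at hx
        rcases List.mem_cons.mp hy with hy | hy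
        · subst hy; exact absurd hpy ha
        · exact ih (List.pairwise_cons.mp hl).2 hx y hy hpy

theorem mem_hits_iff (number length : Int) (data_set : List (Int × Int)) (y : Int) :
    y ∈ data_set.filterMap
        (fun q => if q.1 = number ∧ 0 ≤ q.2 ∧ q.2 ≤ length then some q.2 else none)
      ↔ (number, y) ∈ data_set ∧ 0 ≤ y ∧ y ≤ length := by
  simp only [List.mem_filterMap]
  constructor
  · rintro ⟨⟨k, i⟩, hmem, hif⟩
    by_cases h : k = number ∧ 0 ≤ i ∧ i ≤ length
    · simp only [if_pos h] at hif
      cases hif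
      exact ⟨h.1 ▸ hmem, h.2⟩
    · simp [h] at hif
  · rintro ⟨hmem, h0, hl⟩
    exact ⟨(number, y), hmem, by simp [h0, hl]⟩

-- ===== VERDICT (by name: the statement is the Claim_ definition above) =====
theorem dfs_indexator_spec : Claim_equal_dfs_indexator := by
  intro number length data_set _
  unfold Spec_dfs_indexator dfs_indexator dfs_indexator_alt
  rw [foldl_lastMatch_eq_find?_reverse]
  rw [show (PySem.List.pyRange 0 (length + 1) 1).reverse
        = PySem.List.pyRange length (-1) (-1) from
      by rw [PySem.List.pyRange_neg_one_eq_reverse]; norm_num]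
  set p : Int → Bool := fun i => data_set.contains (number, i) with hp
  set hits := data_set.filterMap
    (fun q => if q.1 = number ∧ 0 ≤ q.2 ∧ q.2 ≤ length then some q.2 else none) with hh
  have hdesc : (PySem.List.pyRange length (-1) (-1)).Pairwise (fun a b => b < a) := by
    rw [PySem.List.pyRange_neg_one_eq_reverse, List.pairwise_reverse]
    exact PySem.List.pairwise_lt_pyRange_one _ _
  cases hfind : (PySem.List.pyRange length (-1) (-1)).find? p with
  | none =>
      have hnone : ∀ y ∈ PySem.List.pyRange length (-1) (-1), ¬ p y = true :=
        fun y hy => by simpa using List.find?_eq_none.mp hfind y hy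
      have hnil : hits = [] := by
        rw [List.eq_nil_iff_forall_not_mem]
        intro y hy
        have := (mem_hits_iff number length data_set y).mp (hh ▸ hy)
        exact hnone y (PySem.List.mem_pyRange_neg_one.mpr ⟨by omega, this.2.2⟩)
          (by simp [hp, this.1])
      rw [hnil]
      simp [PySem.List.max?]
  | some x =>
      have hxmem := List.mem_of_find?_eq_some hfind
      have hxrange := PySem.List.mem_pyRange_neg_one.mp hxmem
      have hpx : p x = true := List.find?_some hfind
      have hxhits : x ∈ hits := by
        rw [hh, mem_hits_iff]
        exact ⟨by simpa [hp] using hpx, by omega, hxrange.2⟩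
      cases hmax : PySem.List.max? hits (fun y => y) with
      | none =>
          rw [PySem.List.max?_eq_none_iff] at hmax
          rw [hmax] at hxhits
          simp at hxhits
      | some m =>
          have hmmem := PySem.List.max?_mem hmax
          have hm : (number, m) ∈ data_set ∧ 0 ≤ m ∧ m ≤ length :=
            (mem_hits_iff number length data_set m).mp (hh ▸ hmmem)
          have hxm : x ≤ m := PySem.List.max?_isMax hmax x hxhits
          have hmx : m ≤ x :=
            find?_desc_isMax p _ hdesc x hfind m
              (PySem.List.mem_pyRange_neg_one.mpr ⟨by omega, hm.2.2⟩)
              (by simp [hp, hm.1])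
          have : m = x := le_antisymm hmx hxm
          simp [hmax, this]
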